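-- pv_equiv track=rewrite | github.com/sanggggg/realtime-safety-time-wall-backup | main.py | get_descendants_and_self
-- ===== SOURCE A (Python) =====
-- import collections
--
-- def get_descendants_and_self(dag, node):
--     descendants = {node}
--     q = collections.deque(dag[node]['successors'])
--     visited = set(q)
--     while q:
--         curr = q.popleft()
--         descendants.add(curr)
--         for succ in dag[curr]['successors']:
--             if succ not in visited:
--                 visited.add(succ)
--                 q.append(succ)
--     return descendants
-- ===== SOURCE B (Python) =====
-- def get_descendants_and_self(dag, node):
--     # Round-based fixed-point closure: no queue, no per-node visited bookkeeping.
--     # Each round recomputes the successor image of the whole current set and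
--     # stops when it no longer grows.
--     result = {node}
--     while True:
--         new = {s for n in result for s in dag[n]['successors']} - result
--         if not new:
--             return result
--         result |= new
-- ===== Notes on version B (the rewrite author's own statement) =====
-- stated objective: alternative
-- what changed: Replaces A's worklist BFS (deque of pending nodes plus a pre-seeded visited set) by a round-based fixed-point iteration that keeps no queue or visited bookkeeping at all: each round recomputes the successor image of the entire current set, subtracts what is already there, and stops when the set no longer grows.
import Mathlib
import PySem

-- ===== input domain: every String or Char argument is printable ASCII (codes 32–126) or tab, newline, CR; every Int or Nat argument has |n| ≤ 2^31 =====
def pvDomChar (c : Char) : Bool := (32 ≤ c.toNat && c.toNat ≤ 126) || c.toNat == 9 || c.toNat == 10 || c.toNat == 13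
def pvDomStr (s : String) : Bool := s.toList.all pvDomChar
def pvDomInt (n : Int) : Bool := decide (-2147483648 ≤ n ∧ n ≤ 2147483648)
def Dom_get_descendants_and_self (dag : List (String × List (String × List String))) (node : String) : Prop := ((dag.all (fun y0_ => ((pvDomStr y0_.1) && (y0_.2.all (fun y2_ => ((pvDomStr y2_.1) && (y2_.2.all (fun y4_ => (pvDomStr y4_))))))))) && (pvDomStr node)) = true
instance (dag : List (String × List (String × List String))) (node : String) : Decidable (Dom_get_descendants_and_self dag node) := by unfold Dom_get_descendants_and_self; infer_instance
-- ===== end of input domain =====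

-- B replaces A's worklist BFS (deque + pre-seeded visited set) by a round-based fixed-point
-- iteration with no queue or visited bookkeeping: each round recomputes the successor image of
-- the whole current set and stops when the set no longer grows (objective: alternative).

-- dag[x]['successors']  (both Pythons contain this exact double lookup; total via getD, exact under Pre_)
def pvSuccs (dag : List (String × List (String × List String))) (x : String) : List String :=
  PySem.Dict.getD (PySem.Dict.mk (PySem.Dict.getD (PySem.Dict.mk dag) x [])) "successors" []

-- all strings occurring in any inner value list of dag (fuel bound only)
def pvU (dag : List (String × List (String × List String))) : List String :=
  dag.flatMap (fun kd => kd.2.flatMap (fun kv => kv.2))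

-- ===== PORT A =====
-- 'for succ in dag[curr]["successors"]: if succ not in visited: visited.add(succ); q.append(succ)'
def pvVisit (st : List String × PySem.Set String) (succ : String) : List String × PySem.Set String :=
  if succ ∈ st.2 then st else (st.1 ++ [succ], PySem.Set.add st.2 succ)

-- the while-q loop; fuel only makes the recursion structural, it never runs out (see lemmas)
def pvBfsA (dag : List (String × List (String × List String))) :
    Nat → PySem.Set String → List String → PySem.Set String → List String
  | 0, descendants, _, _ => descendants
  | fuel+1, descendants, q, visited =>
    match q with
    | [] => descendants
    | curr :: q' =>
      let descendants := PySem.Set.add descendants curr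
      let st := (pvSuccs dag curr).foldl pvVisit (q', visited)
      pvBfsA dag fuel descendants st.1 st.2

def get_descendants_and_self (dag : List (String × List (String × List String))) (node : String) : List String :=
  let q0 := pvSuccs dag node
  pvBfsA dag (q0.length + (pvU dag).length + 1) (PySem.Set.ofList [node]) q0 (PySem.Set.ofList q0)

-- ===== PORT B =====
-- '{s for n in result for s in dag[n]["successors"]} - result'
def pvRound (dag : List (String × List (String × List String))) (result : PySem.Set String) : PySem.Set String :=
  PySem.Set.diff (PySem.Set.ofList (result.flatMap (fun n => pvSuccs dag n))) result

-- 'while True: … if not new: return result; result |= new'; fuel only makes the loop structural,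
-- it never runs out (each non-final round strictly grows result inside pvU)
def pvRoundsB (dag : List (String × List (String × List String))) :
    Nat → PySem.Set String → List String
  | 0, result => result
  | fuel+1, result =>
    let new := pvRound dag result
    if new.isEmpty then result else pvRoundsB dag fuel (PySem.Set.update result new)

def get_descendants_and_self_alt (dag : List (String × List (String × List String))) (node : String) : List String :=
  pvRoundsB dag ((pvU dag).length + 2) (PySem.Set.ofList [node])

-- ===== PRECONDITION & SPEC =====
-- one expansion step of the successor closure
def pvExpand (dag : List (String × List (String × List String))) (S : PySem.Set String) : PySem.Set String :=
  PySem.Set.update S (S.flatMap (pvSuccs dag))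

-- the set of nodes reachable from `node` along 'successors' edges (the iterate has stabilised)
def pvReachSet (dag : List (String × List (String × List String))) (node : String) : PySem.Set String :=
  (pvExpand dag)^[(pvU dag).length + 1] (PySem.Set.ofList [node])

-- Exactly the inputs on which both Pythons return normally: each raises KeyError precisely when
-- some node reachable from `node` (including `node` itself) is not a dag key, or its dict has no
-- 'successors' key.
def Pre_get_descendants_and_self (dag : List (String × List (String × List String))) (node : String) : Prop :=
  ∀ x ∈ pvReachSet dag node,
    (PySem.Dict.get? (PySem.Dict.mk dag) x).isSome = true ∧
    (PySem.Dict.get? (PySem.Dict.mk (PySem.Dict.getD (PySem.Dict.mk dag) x [])) "successors").isSome = true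
instance (dag : List (String × List (String × List String))) (node : String) : Decidable (Pre_get_descendants_and_self dag node) := by unfold Pre_get_descendants_and_self; infer_instance

def pvWitness_get_descendants_and_self : (List (String × List (String × List String))) × String :=
  ([("a", [("successors", ["b", "a"])]), ("b", [("successors", [])])], "a")

def Spec_get_descendants_and_self (dag : List (String × List (String × List String))) (node : String) (out : List String) : Prop := out = get_descendants_and_self_alt dag node
instance (dag : List (String × List (String × List String))) (node : String) (out : List String) : Decidable (Spec_get_descendants_and_self dag node out) := by unfold Spec_get_descendants_and_self; infer_instance

-- ===== CLAIM (what is proved, stated in full; the proofs are below) =====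
def Claim_equal_get_descendants_and_self : Prop := ∀ (dag : List (String × List (String × List String))) (node : String), Dom_get_descendants_and_self dag node → Pre_get_descendants_and_self dag node → Spec_get_descendants_and_self dag node (get_descendants_and_self dag node)

-- ===== LEMMAS AND PROOFS =====

-- the elements of q not in D, first occurrences, in order ("distinct not-in")
def dnin (D : List String) : List String → List String
  | [] => []
  | x :: q => if x ∈ D then dnin D q else x :: dnin (D ++ [x]) q

theorem mem_dnin (D q : List String) (x : String) : x ∈ dnin D q ↔ x ∈ q ∧ x ∉ D := by
  induction q generalizing D with
  | nil => simp [dnin]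
  | cons y q ih =>
    simp only [dnin]
    by_cases hy : y ∈ D
    · simp only [hy, if_true, ih]
      constructor
      · rintro ⟨h1, h2⟩; exact ⟨List.mem_cons_of_mem _ h1, h2⟩
      · rintro ⟨h1, h2⟩
        rcases List.mem_cons.1 h1 with rfl | h1
        · exact absurd hy h2
        · exact ⟨h1, h2⟩
    · simp only [hy, if_false, List.mem_cons, ih, List.mem_append]
      constructor
      · rintro (rfl | ⟨h1, h2⟩)
        · exact ⟨Or.inl rfl, hy⟩
        · exact ⟨Or.inr h1, fun hD => h2 (Or.inl hD)⟩
      · rintro ⟨rfl | h1, h2⟩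
        · exact Or.inl rfl
        · by_cases hxy : x = y
          · exact Or.inl hxy
          · exact Or.inr ⟨h1, by simp [h2, hxy]⟩

theorem nodup_dnin (D q : List String) : (dnin D q).Nodup := by
  induction q generalizing D with
  | nil => simp [dnin]
  | cons y q ih =>
    simp only [dnin]
    by_cases hy : y ∈ D
    · simp [hy, ih]
    · simp only [hy, if_false, List.nodup_cons]
      refine ⟨fun hmem => ?_, ih _⟩
      rw [mem_dnin] at hmem
      exact hmem.2 (by simp)

theorem dnin_id (D t : List String) (hnd : t.Nodup) (hdisj : ∀ x ∈ t, x ∉ D) : dnin D t = t := by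
  induction t generalizing D with
  | nil => rfl
  | cons x t ih =>
    rcases List.nodup_cons.1 hnd with ⟨hxt, hnd'⟩
    have hx : x ∉ D := hdisj x (by simp)
    simp only [dnin, hx, if_false]
    rw [ih (D ++ [x]) hnd']
    intro y hy
    rw [List.mem_append, List.mem_singleton]
    rintro (h | rfl)
    · exact hdisj y (by simp [hy]) h
    · exact hxt hy

-- 'if s not in o: o.append(s)' folded over a list (= PySem.Set.update)
def foldB (l o : List String) : List String :=
  l.foldl (fun o s => if s ∈ o then o else o ++ [s]) o

theorem foldB_eq (l o : List String) : foldB l o = o ++ dnin o l := by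
  induction l generalizing o with
  | nil => simp [foldB, dnin]
  | cons s l ih =>
    simp only [foldB, List.foldl_cons, dnin]
    by_cases hs : s ∈ o
    · simp only [hs, if_true]; exact ih o
    · simpa [hs, foldB] using ih (o ++ [s])

theorem update_eq_foldB (o l : List String) : PySem.Set.update o l = foldB l o := by
  induction l generalizing o with
  | nil => rfl
  | cons s l ih =>
    rw [PySem.Set.update_cons, PySem.Set.add_eq_ite]
    simp only [foldB, List.foldl_cons]
    exact ih _

theorem foldB_append (a b o : List String) : foldB (a ++ b) o = foldB b (foldB a o) := by
  simp [foldB, List.foldl_append]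

theorem foldB_absorb (l o : List String) (h : ∀ x ∈ l, x ∈ o) : foldB l o = o := by
  rw [foldB_eq]
  have : dnin o l = [] := by
    cases hd : dnin o l with
    | nil => rfl
    | cons x t =>
      exfalso
      have hx : x ∈ dnin o l := by rw [hd]; simp
      rw [mem_dnin] at hx
      exact hx.2 (h x hx.1)
  simp [this]

-- (dnin D1 l).filter (· ∉ R) = dnin D2 l when membership in D2 is membership in D1 ∪ R
theorem filter_dnin (l : List String) : ∀ (D1 D2 R : List String),
    (∀ x, x ∈ D1 ∨ x ∈ R ↔ x ∈ D2) →
    (dnin D1 l).filter (fun x => decide (x ∉ R)) = dnin D2 l := by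
  induction l with
  | nil => intro D1 D2 R _; rfl
  | cons y l ih =>
    intro D1 D2 R h
    simp only [dnin]
    by_cases h1 : y ∈ D1
    · have h2 : y ∈ D2 := (h y).1 (Or.inl h1)
      simp only [h1, h2, if_true]
      exact ih D1 D2 R h
    · by_cases hR : y ∈ R
      · have h2 : y ∈ D2 := (h y).1 (Or.inr hR)
        simp only [h1, h2, if_true, if_false, List.filter_cons,
          show (decide (y ∉ R)) = false by simp [hR]]
        apply ih (D1 ++ [y]) D2 R
        intro x
        constructor
        · rintro (hx | hx)
          · rcases List.mem_append.1 hx with hx | hx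
            · exact (h x).1 (Or.inl hx)
            · rw [List.mem_singleton] at hx; subst hx; exact h2
          · exact (h x).1 (Or.inr hx)
        · intro hx
          rcases (h x).2 hx with hx' | hx'
          · exact Or.inl (List.mem_append.2 (Or.inl hx'))
          · exact Or.inr hx'
      · have h2 : y ∉ D2 := fun hc => by
          rcases (h y).2 hc with hc' | hc'
          · exact h1 hc'
          · exact hR hc'
        simp only [h1, h2, if_false, List.filter_cons,
          show (decide (y ∉ R)) = true by simp [hR], if_true]
        congr 1
        apply ih (D1 ++ [y]) (D2 ++ [y]) R
        intro x
        constructor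
        · rintro (hx | hx)
          · rcases List.mem_append.1 hx with hx | hx
            · exact List.mem_append.2 (Or.inl ((h x).1 (Or.inl hx)))
            · exact List.mem_append.2 (Or.inr hx)
          · exact List.mem_append.2 (Or.inl ((h x).1 (Or.inr hx)))
        · intro hx
          rcases List.mem_append.1 hx with hx | hx
          · rcases (h x).2 hx with hx' | hx'
            · exact Or.inl (List.mem_append.2 (Or.inl hx'))
            · exact Or.inr hx'
          · exact Or.inl (List.mem_append.2 (Or.inr hx))

theorem ofList_eq_dnin (l : List String) : PySem.Set.ofList l = dnin [] l := by
  have : PySem.Set.ofList l = PySem.Set.update [] l := rfl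
  rw [this, update_eq_foldB, foldB_eq]
  rfl

theorem pvRound_eq_dnin (dag : List (String × List (String × List String))) (R : List String) :
    pvRound dag R = dnin R (R.flatMap (pvSuccs dag)) := by
  unfold pvRound PySem.Set.diff
  have h1 : (fun x => !PySem.Set.contains R x) = (fun x => decide (x ∉ R)) := by
    funext x
    by_cases hx : x ∈ R <;> simp [hx]
  rw [h1, ofList_eq_dnin]
  apply filter_dnin
  intro x; simp

theorem getD_mid (pre rest : List String) (x : String) :
    (pre ++ x :: rest).getD pre.length "" = x := by
  induction pre with
  | nil => simp
  | cons a pre ih => rw [List.cons_append, List.length_cons, List.getD_cons_succ, ih]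

theorem filter_snoc_sub (U v : List String) (s : String) (hs : s ∉ U) :
    U.filter (fun x => decide (x ∉ v ++ [s])) = U.filter (fun x => decide (x ∉ v)) := by
  apply List.filter_congr
  intro x hx
  have hxs : x ≠ s := fun h => hs (h ▸ hx)
  simp [hxs]

theorem filter_snoc_len (U v : List String) (s : String) (hU : U.Nodup) (hsU : s ∈ U) (hsv : s ∉ v) :
    (U.filter (fun x => decide (x ∉ v ++ [s]))).length + 1 = (U.filter (fun x => decide (x ∉ v))).length := by
  induction U with
  | nil => simp at hsU
  | cons u U ih =>
    rcases List.nodup_cons.1 hU with ⟨huU, hU'⟩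
    rcases List.mem_cons.1 hsU with rfl | hsU'
    · simp only [List.filter_cons]
      have : (decide (s ∉ v ++ [s])) = false := by simp
      rw [this, filter_snoc_sub U v s huU]
      simp [hsv]
    · have hus : u ≠ s := fun h => huU (h ▸ hsU')
      simp only [List.filter_cons]
      by_cases huv : u ∈ v
      · simp only [show (decide (u ∉ v ++ [s])) = false by simp [huv],
          show (decide (u ∉ v)) = false by simp [huv]]
        exact ih hU' hsU'
      · simp only [show (decide (u ∉ v ++ [s])) = true by simp [huv, hus],
          show (decide (u ∉ v)) = true by simp [huv]]
        simp only [if_true, List.length_cons]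
        have := ih hU' hsU'
        omega

theorem filter_append_len (U : List String) (hU : U.Nodup) :
    ∀ (t R : List String), t.Nodup → (∀ s ∈ t, s ∈ U ∧ s ∉ R) →
    (U.filter (fun x => decide (x ∉ R))).length
      = (U.filter (fun x => decide (x ∉ R ++ t))).length + t.length := by
  intro t
  induction t with
  | nil => intro R _ _; simp
  | cons s t ih =>
    intro R hnd hsub
    rcases List.nodup_cons.1 hnd with ⟨hst, hnd'⟩
    have h1 := filter_snoc_len U R s hU (hsub s (by simp)).1 (hsub s (by simp)).2
    have h2 := ih (R ++ [s]) hnd' (by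
      intro x hx
      refine ⟨(hsub x (by simp [hx])).1, ?_⟩
      rw [List.mem_append, List.mem_singleton]
      rintro (h | rfl)
      · exact (hsub x (by simp [hx])).2 h
      · exact hst hx)
    have h3 : R ++ [s] ++ t = R ++ s :: t := by simp
    rw [h3] at h2
    simp only [List.length_cons]
    omega

theorem nodup_len_le (X Y : List String) (hX : X.Nodup) (h : ∀ x ∈ X, x ∈ Y) :
    X.length ≤ Y.length :=
  List.Subperm.length_le (List.subperm_of_subset hX h)

theorem foldB_cons (s : String) (l o : List String) :
    foldB (s :: l) o = foldB l (if s ∈ o then o else o ++ [s]) := rfl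

-- 'if succ not in seen: seen.add(succ); order.append(succ)' — the growing-order loop, an
-- intermediate form between A's BFS and B's rounds (proof helper only)
def pvReach (st : PySem.Set String × List String) (succ : String) : PySem.Set String × List String :=
  if succ ∈ st.1 then st else (PySem.Set.add st.1 succ, st.2 ++ [succ])

def pvLoopB (dag : List (String × List (String × List String))) :
    Nat → PySem.Set String → List String → Nat → List String
  | 0, seen, _, _ => seen
  | fuel+1, seen, order, i =>
    if i < order.length then
      let st := (pvSuccs dag (order.getD i "")).foldl pvReach (seen, order)
      pvLoopB dag fuel st.1 st.2 (i+1)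
    else seen

theorem reach_pair (l o : List String) : l.foldl pvReach (o, o) = (foldB l o, foldB l o) := by
  induction l generalizing o with
  | nil => simp [foldB]
  | cons s l ih =>
    simp only [List.foldl_cons, foldB, pvReach]
    by_cases hs : s ∈ o
    · simp only [hs, if_true]; exact ih o
    · simp only [hs, if_false, PySem.Set.add_of_not_mem hs]
      exact ih (o ++ [s])

theorem dnin_snoc_mem (D q : List String) (x : String) (h : x ∈ D) :
    dnin D (q ++ [x]) = dnin D q := by
  induction q generalizing D with
  | nil => simp [dnin, h]
  | cons y q ih =>
    simp only [List.cons_append, dnin]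
    by_cases hy : y ∈ D
    · simp [hy, ih _ h]
    · simp only [hy, if_false]
      rw [ih (D ++ [y]) (by simp [h])]

theorem dnin_snoc_not_mem (D q : List String) (x : String) (h1 : x ∉ D) (h2 : x ∉ dnin D q) :
    dnin D (q ++ [x]) = dnin D q ++ [x] := by
  induction q generalizing D with
  | nil => simp [dnin, h1]
  | cons y q ih =>
    simp only [List.cons_append, dnin] at h2 ⊢
    by_cases hy : y ∈ D
    · simp only [hy, if_true] at h2 ⊢; exact ih _ h1 h2
    · simp only [hy, if_false, List.mem_cons] at h2 ⊢
      have hxy : x ≠ y := fun hxy => h2 (Or.inl hxy)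
      rw [ih (D ++ [y]) (by simp [h1, hxy]) (fun hc => h2 (Or.inr hc))]
      simp

theorem getD_mk_cases {κ ν : Type} [BEq κ] (d : List (κ × ν)) (k : κ) (dflt : ν) :
    PySem.Dict.getD (PySem.Dict.mk d) k dflt = dflt ∨ PySem.Dict.getD (PySem.Dict.mk d) k dflt ∈ d.map Prod.snd := by
  induction d with
  | nil => left; simp [PySem.Dict.getD, PySem.Dict.get?]
  | cons p d ih =>
    rw [PySem.Dict.getD_eq_get?_getD]
    rcases p with ⟨k', v⟩
    rw [PySem.Dict.get?_mk_cons]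
    by_cases h : (k' == k) = true
    · simp [h]
    · rw [if_neg h]
      simp only [List.map_cons, List.mem_cons]
      rw [← PySem.Dict.getD_eq_get?_getD]
      rcases ih with h1 | h1
      · left; exact h1
      · right; right; exact h1

theorem succs_sub (dag : List (String × List (String × List String))) (x s : String)
    (h : s ∈ pvSuccs dag x) : s ∈ pvU dag := by
  unfold pvSuccs at h
  rcases getD_mk_cases dag x [] with h1 | h1
  · rw [h1] at h
    rcases getD_mk_cases ([] : List (String × List String)) "successors" [] with h2 | h2
    · rw [h2] at h; simp at h
    · simp at h2
  · rw [List.mem_map] at h1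
    rcases h1 with ⟨⟨k, dct⟩, hkd, hd⟩
    rcases getD_mk_cases (PySem.Dict.getD (PySem.Dict.mk dag) x []) "successors" [] with h2 | h2
    · rw [h2] at h; simp at h
    · rw [List.mem_map] at h2
      rcases h2 with ⟨⟨key, v⟩, hv, hv2⟩
      simp only [pvU, List.mem_flatMap]
      refine ⟨(k, dct), hkd, ?_⟩
      refine ⟨(key, v), by rw [hd]; exact hv, by rw [hv2]; exact h⟩

theorem foldA_noop (l : List String) : ∀ (q v : List String), (∀ s ∈ l, s ∈ v) →
    l.foldl pvVisit (q, v) = (q, v) := by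
  induction l with
  | nil => intro q v _; rfl
  | cons s l ih =>
    intro q v h
    simp only [List.foldl_cons, pvVisit, h s (by simp), if_true]
    exact ih q v (fun t ht => h t (by simp [ht]))

theorem innerStep (U' D : List String) (node : String) (l : List String) :
    ∀ (q visited order : List String),
    order = D ++ dnin D q →
    node ∈ D →
    (∀ x ∈ visited, x ∈ order) →
    (∀ x ∈ order, x ≠ node → x ∈ visited) →
    (node ∈ q → node ∈ visited) →
    (∀ s ∈ l, s ∈ U') →
    U'.Nodup →
    let st := l.foldl pvVisit (q, visited)
    let oB := foldB l order
    oB = D ++ dnin D st.1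
    ∧ (∀ x ∈ st.2, x ∈ oB) ∧ (∀ x ∈ oB, x ≠ node → x ∈ st.2) ∧ (node ∈ st.1 → node ∈ st.2)
    ∧ (∀ s ∈ l, s ∈ st.2) ∧ (∀ x ∈ visited, x ∈ st.2)
    ∧ st.1.length + (U'.filter (fun x => decide (x ∉ st.2))).length
        ≤ q.length + (U'.filter (fun x => decide (x ∉ visited))).length
    ∧ oB.length + (U'.filter (fun x => decide (x ∉ oB))).length
        ≤ order.length + (U'.filter (fun x => decide (x ∉ order))).length
    ∧ order.length ≤ oB.length := by
  induction l with
  | nil =>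
    intro q visited order hord hnode hv1 hv2 hv3 _ _
    exact ⟨hord, hv1, hv2, hv3, by simp, fun x hx => hx, le_refl _, le_refl _, le_refl _⟩
  | cons s l ih =>
    intro q visited order hord hnode hv1 hv2 hv3 hlU hUnd
    simp only [List.foldl_cons, foldB_cons, pvVisit]
    by_cases hs : s ∈ visited
    · -- A skips; s ∈ order so B skips too
      have hso : s ∈ order := hv1 s hs
      simp only [hs, if_true, hso]
      obtain ⟨c1, c2, c3, c4, c5, c6, c7, c8, c9⟩ :=
        ih q visited order hord hnode hv1 hv2 hv3 (fun t ht => hlU t (by simp [ht])) hUnd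
      refine ⟨c1, c2, c3, c4, ?_, c6, c7, c8, c9⟩
      intro t ht
      rcases List.mem_cons.1 ht with rfl | ht
      · exact c6 t hs
      · exact c5 t ht
    · by_cases hsn : s = node
      · -- s = node ∉ visited: A appends node to q and visited; B skips (node ∈ order)
        subst hsn
        have hso : s ∈ order := hord ▸ (List.mem_append.2 (Or.inl hnode))
        simp only [hs, if_false, hso, if_true, PySem.Set.add_of_not_mem hs]
        have hord' : order = D ++ dnin D (q ++ [s]) := by
          rw [dnin_snoc_mem D q s hnode]; exact hord
        have hv1' : ∀ x ∈ visited ++ [s], x ∈ order := by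
          intro x hx
          rcases List.mem_append.1 hx with hx | hx
          · exact hv1 x hx
          · simp at hx; subst hx; exact hso
        have hv2' : ∀ x ∈ order, x ≠ s → x ∈ visited ++ [s] := by
          intro x hx hxs; exact List.mem_append.2 (Or.inl (hv2 x hx hxs))
        have hv3' : s ∈ q ++ [s] → s ∈ visited ++ [s] := by intro _; simp
        have res := ih (q ++ [s]) (visited ++ [s]) order hord' hnode hv1' hv2' hv3'
          (fun t ht => hlU t (by simp [ht])) hUnd
        obtain ⟨c1, c2, c3, c4, c5, c6, c7, c8, c9⟩ := res
        refine ⟨c1, c2, c3, ?_, ?_, ?_, ?_, c8, c9⟩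
        · intro _; exact c6 s (by simp)
        · intro t ht
          rcases List.mem_cons.1 ht with rfl | ht
          · exact c6 t (by simp)
          · exact c5 t ht
        · intro x hx; exact c6 x (List.mem_append.2 (Or.inl hx))
        · have hfl := filter_snoc_len U' visited s hUnd (hlU s (by simp)) hs
          simp only [List.length_append, List.length_singleton] at c7
          omega
      · -- s fresh: both append
        have hso : s ∉ order := by
          intro hmem
          exact hs (hv2 s hmem hsn)
        simp only [hs, if_false, hso, PySem.Set.add_of_not_mem hs]
        have hsd : s ∉ D := fun hd => hso (hord ▸ List.mem_append.2 (Or.inl hd))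
        have hsdn : s ∉ dnin D q := fun hd => hso (hord ▸ List.mem_append.2 (Or.inr hd))
        have hord' : order ++ [s] = D ++ dnin D (q ++ [s]) := by
          rw [dnin_snoc_not_mem D q s hsd hsdn, hord, List.append_assoc]
        have hv1' : ∀ x ∈ visited ++ [s], x ∈ order ++ [s] := by
          intro x hx
          rcases List.mem_append.1 hx with hx | hx
          · exact List.mem_append.2 (Or.inl (hv1 x hx))
          · exact List.mem_append.2 (Or.inr hx)
        have hv2' : ∀ x ∈ order ++ [s], x ≠ node → x ∈ visited ++ [s] := by
          intro x hx hxn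
          rcases List.mem_append.1 hx with hx | hx
          · exact List.mem_append.2 (Or.inl (hv2 x hx hxn))
          · exact List.mem_append.2 (Or.inr hx)
        have hv3' : node ∈ q ++ [s] → node ∈ visited ++ [s] := by
          intro hx
          rcases List.mem_append.1 hx with hx | hx
          · exact List.mem_append.2 (Or.inl (hv3 hx))
          · simp at hx; exact absurd hx.symm hsn
        have res := ih (q ++ [s]) (visited ++ [s]) (order ++ [s]) hord' hnode hv1' hv2' hv3'
          (fun t ht => hlU t (by simp [ht])) hUnd
        obtain ⟨c1, c2, c3, c4, c5, c6, c7, c8, c9⟩ := res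
        refine ⟨c1, c2, c3, c4, ?_, ?_, ?_, ?_, ?_⟩
        · intro t ht
          rcases List.mem_cons.1 ht with rfl | ht
          · exact c6 t (by simp)
          · exact c5 t ht
        · intro x hx; exact c6 x (List.mem_append.2 (Or.inl hx))
        · have hfl := filter_snoc_len U' visited s hUnd (hlU s (by simp)) hs
          simp only [List.length_append, List.length_singleton] at c7
          omega
        · have hfl := filter_snoc_len U' order s hUnd (hlU s (by simp)) hso
          simp only [List.length_append, List.length_singleton] at c8
          omega
        · simp only [List.length_append, List.length_singleton] at c9
          omega

theorem mainSim (dag : List (String × List (String × List String))) (node : String) :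
    ∀ (fa : Nat) (fb : Nat) (D q visited order : List String) (i : Nat),
    order = D ++ dnin D q →
    i = D.length →
    D.Nodup →
    node ∈ D →
    (∀ x ∈ visited, x ∈ order) →
    (∀ x ∈ order, x ≠ node → x ∈ visited) →
    (node ∈ q → node ∈ visited) →
    (∀ x ∈ D, ∀ s ∈ pvSuccs dag x, s ∈ visited) →
    q.length + ((pvU dag).dedup.filter (fun x => decide (x ∉ visited))).length ≤ fa →
    (order.length - i) + ((pvU dag).dedup.filter (fun x => decide (x ∉ order))).length ≤ fb →
    pvBfsA dag fa D q visited = pvLoopB dag fb order order i := by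
  intro fa
  induction fa with
  | zero =>
    intro fb D q visited order i hord hi _ _ _ _ _ _ hfa hfb
    have hq : q = [] := List.length_eq_zero_iff.1 (by omega)
    subst hq
    simp only [dnin, List.append_nil] at hord
    subst hord
    cases fb with
    | zero => rfl
    | succ fb' => simp [pvBfsA, pvLoopB, hi]
  | succ fa ih =>
    intro fb D q visited order i hord hi hnd hnode hv1 hv2 hv3 hsub hfa hfb
    match q with
    | [] =>
      simp only [dnin, List.append_nil] at hord
      subst hord
      cases fb with
      | zero => rfl
      | succ fb' => simp [pvBfsA, pvLoopB, hi]
    | curr :: q' =>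
      by_cases hcur : curr ∈ D
      · -- duplicate pop: a no-op for A, B does not move
        have hrw : pvBfsA dag (fa+1) D (curr :: q') visited = pvBfsA dag fa D q' visited := by
          simp only [pvBfsA, PySem.Set.add_of_mem hcur,
            foldA_noop _ q' visited (fun s hs => hsub curr hcur s hs)]
        rw [hrw]
        apply ih fb D q' visited order i _ hi hnd hnode hv1 hv2 (fun hn => hv3 (by simp [hn])) hsub _ hfb
        · rw [hord]; simp [dnin, hcur]
        · simp only [List.length_cons] at hfa; omega
      · -- fresh pop: both sides advance one step
        have hR : dnin D (curr :: q') = curr :: dnin (D ++ [curr]) q' := by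
          simp [dnin, hcur]
        have hordc : order = D ++ curr :: dnin (D ++ [curr]) q' := by rw [hord, hR]
        have hilt : i < order.length := by rw [hordc, hi]; simp
        cases fb with
        | zero => exfalso; omega
        | succ fb' =>
          have hgetD : order.getD i "" = curr := by
            rw [hordc, hi]; exact getD_mid D _ curr
          have hcurU : ∀ s ∈ pvSuccs dag curr, s ∈ (pvU dag).dedup := by
            intro s hs
            rw [List.mem_dedup]
            exact succs_sub dag curr s hs
          obtain ⟨c1, c2, c3, c4, c5, c6, c7, c8, c9⟩ :=
            innerStep (pvU dag).dedup (D ++ [curr]) node (pvSuccs dag curr) q' visited order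
              (by rw [hordc, List.append_assoc]; rfl)
              (List.mem_append.2 (Or.inl hnode))
              hv1 hv2 (fun hn => hv3 (by simp [hn]))
              hcurU (List.nodup_dedup _)
          have hstep : pvBfsA dag (fa+1) D (curr :: q') visited
              = pvBfsA dag fa (D ++ [curr]) ((pvSuccs dag curr).foldl pvVisit (q', visited)).1
                  ((pvSuccs dag curr).foldl pvVisit (q', visited)).2 := by
            simp only [pvBfsA]
            rw [PySem.Set.add_of_not_mem hcur]
          have hstepB : pvLoopB dag (fb'+1) order order i
              = pvLoopB dag fb' (foldB (pvSuccs dag curr) order) (foldB (pvSuccs dag curr) order) (i+1) := by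
            simp only [pvLoopB]
            rw [if_pos hilt, hgetD, reach_pair]
          rw [hstep, hstepB]
          apply ih fb' (D ++ [curr]) _ _ (foldB (pvSuccs dag curr) order) (i+1) c1
            (by simp [hi]) (by simp only [List.nodup_append, List.nodup_singleton, true_and]; exact ⟨hnd, by intro a ha b hb; rw [List.mem_singleton] at hb; subst hb; exact fun h => hcur (h ▸ ha)⟩) (List.mem_append.2 (Or.inl hnode)) c2 c3 c4
          · intro x hx s hs
            rcases List.mem_append.1 hx with hx | hx
            · exact c6 s (hsub x hx s hs)
            · simp only [List.mem_singleton] at hx; subst hx; exact c5 s hs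
          · simp only [List.length_cons] at hfa; omega
          · have h9 : i + 1 ≤ (foldB (pvSuccs dag curr) order).length := by
              have : i + 1 ≤ order.length := hilt
              omega
            omega

theorem filter_split_le (U oB : List String) (X : List String) (hX : X.Nodup)
    (hsub : ∀ x ∈ X, x ∈ U ∧ x ∈ oB) :
    X.length + (U.filter (fun x => decide (x ∉ oB))).length ≤ U.length := by
  have h1 : X.length ≤ (U.filter (fun x => decide (x ∈ oB))).length := by
    apply nodup_len_le X _ hX
    intro x hx
    rw [List.mem_filter]
    exact ⟨(hsub x hx).1, by simp [(hsub x hx).2]⟩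
  have h2 : (U.filter (fun x => decide (x ∈ oB))).length
      + (U.filter (fun x => decide (x ∉ oB))).length = U.length := by
    have := (List.length_eq_length_filter_add (l := U) (fun x => decide (x ∈ oB))).symm
    simpa [decide_not] using this
  omega

-- A equals the growing-order loop (instantiation of mainSim)
theorem A_eq_loop (dag : List (String × List (String × List String))) (node : String) :
    get_descendants_and_self dag node
      = pvLoopB dag ((pvU dag).length + 2) [node] [node] 0 := by
  unfold get_descendants_and_self
  have hone : PySem.Set.ofList [node] = [node] :=
    PySem.Set.ofList_eq_self_of_nodup [node] (List.nodup_singleton _)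
  rw [hone]
  set l := pvSuccs dag node with hl
  set N := (pvU dag).length with hN
  set oB := foldB l [node] with hoB
  -- unfold the loop's first iteration (it processes `node` itself)
  have hstepB : pvLoopB dag (N + 2) [node] [node] 0 = pvLoopB dag (N + 1) oB oB 1 := by
    show pvLoopB dag (N + 1 + 1) [node] [node] 0 = _
    simp only [pvLoopB]
    rw [if_pos (by simp)]
    have : ([node] : List String).getD 0 "" = node := rfl
    rw [this, ← hl, reach_pair, ← hoB]
  rw [hstepB]
  have hfold : oB = [node] ++ dnin [node] l := foldB_eq l [node]
  apply mainSim dag node (l.length + N + 1) (N + 1) [node] l (PySem.Set.ofList l) oB 1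
    hfold rfl (List.nodup_singleton _) (by simp)
  · intro x hx
    rw [PySem.Set.mem_ofList] at hx
    by_cases hxn : x = node
    · subst hxn; rw [hfold]; simp
    · rw [hfold]
      refine List.mem_append.2 (Or.inr ?_)
      rw [mem_dnin]
      exact ⟨hx, by simp [hxn]⟩
  · intro x hx hxn
    rw [hfold] at hx
    rcases List.mem_append.1 hx with hx | hx
    · simp at hx; exact absurd hx hxn
    · rw [mem_dnin] at hx
      rw [PySem.Set.mem_ofList]
      exact hx.1
  · intro hx
    rw [PySem.Set.mem_ofList]
    exact hx
  · intro x hx s hs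
    simp only [List.mem_singleton] at hx
    subst hx
    rw [PySem.Set.mem_ofList]
    exact hs
  · have h1 : ((pvU dag).dedup.filter (fun x => decide (x ∉ PySem.Set.ofList l))).length
        ≤ (pvU dag).dedup.length := List.length_filter_le _ _
    have h2 : (pvU dag).dedup.length ≤ N := by
      rw [hN]; exact List.Sublist.length_le (List.dedup_sublist _)
    omega
  · -- fuel bound: the fresh part of oB and the not-yet-reached part of pvU are disjoint
    have hlen : oB.length = (dnin [node] l).length + 1 := by rw [hfold]; simp
    have hmain : (dnin [node] l).length
        + ((pvU dag).dedup.filter (fun x => decide (x ∉ oB))).length ≤ (pvU dag).dedup.length := by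
      apply filter_split_le _ _ _ (nodup_dnin _ _)
      intro x hx
      rw [mem_dnin] at hx
      constructor
      · rw [List.mem_dedup]; exact succs_sub dag node x hx.1
      · rw [hfold]
        exact List.mem_append.2 (Or.inr (by rw [mem_dnin]; exact hx))
    have h2 : (pvU dag).dedup.length ≤ N := by
      rw [hN]; exact List.Sublist.length_le (List.dedup_sublist _)
    omega

-- the loop at the end of its order does nothing
theorem pvLoopB_done (dag : List (String × List (String × List String))) (f : Nat) (O : List String) :
    pvLoopB dag f O O O.length = O := by
  cases f with
  | zero => rfl
  | succ f => simp [pvLoopB]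

-- the loop processes a contiguous block of positions in one algebraic step
theorem blockL (dag : List (String × List (String × List String))) (seg : List String) :
    ∀ (f : Nat) (pre rest : List String), seg.length ≤ f →
    pvLoopB dag f (pre ++ seg ++ rest) (pre ++ seg ++ rest) pre.length
      = pvLoopB dag (f - seg.length) (foldB (seg.flatMap (pvSuccs dag)) (pre ++ seg ++ rest))
          (foldB (seg.flatMap (pvSuccs dag)) (pre ++ seg ++ rest)) (pre.length + seg.length) := by
  induction seg with
  | nil =>
    intro f pre rest _
    simp [foldB]
  | cons x seg ih =>
    intro f pre rest hf
    cases f with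
    | zero => simp at hf
    | succ f =>
      have hO : pre ++ (x :: seg) ++ rest = pre ++ x :: (seg ++ rest) := by simp
      have hilt : pre.length < (pre ++ x :: (seg ++ rest)).length := by
        simp only [List.length_append, List.length_cons]
        omega
      have hstep : pvLoopB dag (f+1) (pre ++ (x :: seg) ++ rest) (pre ++ (x :: seg) ++ rest) pre.length
          = pvLoopB dag f (foldB (pvSuccs dag x) (pre ++ (x :: seg) ++ rest))
              (foldB (pvSuccs dag x) (pre ++ (x :: seg) ++ rest)) (pre.length + 1) := by
        rw [hO]
        simp only [pvLoopB]
        rw [if_pos hilt, getD_mid, reach_pair, ← hO]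
      rw [hstep]
      have hsh : foldB (pvSuccs dag x) (pre ++ (x :: seg) ++ rest)
          = (pre ++ [x]) ++ seg ++ (rest ++ dnin (pre ++ (x :: seg) ++ rest) (pvSuccs dag x)) := by
        rw [foldB_eq]; simp
      rw [hsh]
      have hlen : (pre ++ [x]).length = pre.length + 1 := by simp
      rw [← hlen]
      rw [ih f (pre ++ [x]) (rest ++ dnin (pre ++ (x :: seg) ++ rest) (pvSuccs dag x)) (by simp at hf ⊢; omega)]
      rw [← hsh, ← foldB_append]
      have hfl : pvSuccs dag x ++ seg.flatMap (pvSuccs dag) = (x :: seg).flatMap (pvSuccs dag) := by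
        simp
      have e1 : f + 1 - (x :: seg).length = f - seg.length := by
        simp only [List.length_cons]; omega
      have e2 : pre.length + (x :: seg).length = (pre ++ [x]).length + seg.length := by
        simp only [List.length_cons, List.length_append, List.length_nil]; omega
      rw [hfl, e1, e2]

-- the bridge: from a layer boundary, the growing-order loop and B's rounds return the same list
theorem bridge (dag : List (String × List (String × List String))) :
    ∀ (f2 f1 : Nat) (R : List String) (i : Nat),
    R.Nodup →
    i ≤ R.length →
    foldB ((R.take i).flatMap (pvSuccs dag)) R = R →
    R.length - i + ((pvU dag).dedup.filter (fun x => decide (x ∉ R))).length ≤ f1 →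
    1 + ((pvU dag).dedup.filter (fun x => decide (x ∉ R))).length ≤ f2 →
    pvLoopB dag f1 R R i = pvRoundsB dag f2 R := by
  intro f2
  induction f2 with
  | zero => intro f1 R i _ _ _ _ hf2; omega
  | succ f2 ih =>
    intro f1 R i hnd hi habs hf1 hf2
    have hsplit : R = R.take i ++ R.drop i ++ [] := by simp
    have hlt : (R.take i).length = i := by simp [hi]
    have hdl : (R.drop i).length = R.length - i := by simp
    have hblock := blockL dag (R.drop i) f1 (R.take i) [] (by omega)
    rw [hlt] at hblock
    rw [hsplit]
    rw [hblock]
    rw [← hsplit] at *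
    have hRi : i + (R.drop i).length = R.length := by omega
    -- the block result is the full expansion of R
    have hfull : foldB ((R.drop i).flatMap (pvSuccs dag)) R = foldB (R.flatMap (pvSuccs dag)) R := by
      conv_rhs => rw [show R = R.take i ++ R.drop i by simp]
      rw [List.flatMap_append, foldB_append, show R.take i ++ R.drop i = R by simp, habs]
    rw [hfull]
    set t := dnin R (R.flatMap (pvSuccs dag)) with ht
    have hR' : foldB (R.flatMap (pvSuccs dag)) R = R ++ t := foldB_eq _ _
    have hnew : pvRound dag R = t := pvRound_eq_dnin dag R
    have htU : ∀ s ∈ t, s ∈ (pvU dag).dedup ∧ s ∉ R := by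
      intro s hs
      rw [ht, mem_dnin] at hs
      rcases hs with ⟨hs1, hs2⟩
      rw [List.mem_flatMap] at hs1
      rcases hs1 with ⟨x, _, hsx⟩
      exact ⟨List.mem_dedup.2 (succs_sub dag x s hsx), hs2⟩
    cases hcase : t with
    | nil =>
      -- no growth: both return R
      rw [hR', hcase, List.append_nil, hRi, pvLoopB_done]
      simp only [pvRoundsB]
      rw [hnew, hcase]
      simp
    | cons y t' =>
      -- growth: one loop block = one round
      have htne : t ≠ [] := by rw [hcase]; simp
      have hnd_t : t.Nodup := ht ▸ nodup_dnin _ _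
      have hstepR : pvRoundsB dag (f2+1) R = pvRoundsB dag f2 (PySem.Set.update R t) := by
        simp only [pvRoundsB]
        rw [hnew, List.isEmpty_eq_false_iff.2 htne]
        simp
      have hupd : PySem.Set.update R t = R ++ t := by
        rw [update_eq_foldB, foldB_eq, dnin_id R t hnd_t (fun x hx => (htU x hx).2)]
      rw [hstepR, hupd, hR']
      have hcnt := filter_append_len (pvU dag).dedup (List.nodup_dedup _) t R hnd_t htU
      have hnd' : (R ++ t).Nodup := by
        apply List.Nodup.append hnd hnd_t
        intro x hx hx'
        exact (htU x hx').2 hx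
      rw [hRi, hdl]
      apply ih (f1 - (R.length - i)) (R ++ t) R.length hnd' (by simp)
      · -- the prefix R of R ++ t is fully absorbed
        rw [List.take_left']
        apply foldB_absorb
        intro x hx
        by_cases hxR : x ∈ R
        · exact List.mem_append.2 (Or.inl hxR)
        · refine List.mem_append.2 (Or.inr ?_)
          rw [ht, mem_dnin]
          exact ⟨hx, hxR⟩
        · rfl
      · have hlen' : (R ++ t).length = R.length + t.length := by simp
        have htpos : 1 ≤ t.length := by rw [hcase]; simp
        omega
      · have htpos : 1 ≤ t.length := by rw [hcase]; simp
        omega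

-- ===== VERDICT (by name: the statement is the Claim_ definition above) =====
theorem get_descendants_and_self_spec : Claim_equal_get_descendants_and_self := by
  intro dag node _ _
  unfold Spec_get_descendants_and_self get_descendants_and_self_alt
  have hone : PySem.Set.ofList [node] = [node] :=
    PySem.Set.ofList_eq_self_of_nodup [node] (List.nodup_singleton _)
  rw [hone, A_eq_loop]
  apply bridge dag ((pvU dag).length + 2) ((pvU dag).length + 2) [node] 0
    (List.nodup_singleton _) (by simp)
  · simp [foldB]
  · have h1 : (((pvU dag).dedup.filter (fun x => decide (x ∉ ([node] : List String))))).length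
        ≤ (pvU dag).dedup.length := List.length_filter_le _ _
    have h2 : (pvU dag).dedup.length ≤ (pvU dag).length :=
      List.Sublist.length_le (List.dedup_sublist _)
    simp only [List.length_singleton]
    omega
  · have h1 : (((pvU dag).dedup.filter (fun x => decide (x ∉ ([node] : List String))))).length
        ≤ (pvU dag).dedup.length := List.length_filter_le _ _
    have h2 : (pvU dag).dedup.length ≤ (pvU dag).length :=
      List.Sublist.length_le (List.dedup_sublist _)
    omega
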